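-- pv_equiv track=rewrite | github.com/dmendelsohn/advent_of_code | 2016/day14/day14.py | get_first_n_runner
-- ===== SOURCE A (Python) =====
-- def get_first_n_runner(s, n):
-- 	cur_char = ''
-- 	count = 0
-- 	for c in s:
-- 		if c == cur_char:
-- 			count+=1
-- 			if count == n:
-- 				return c
-- 		else:
-- 			cur_char = c
-- 			count = 1
-- 	return ''
-- ===== SOURCE B (Python) =====
-- def get_first_n_runner(s, n):
--     # Brute-force window check: return the first character whose length-n
--     # window is constant (s[i:i+n] == s[i]*n).  A's count==n check can only
--     # fire with count >= 2, so for n < 2 the answer is always ''; a run of n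
--     # equal characters cannot fit in a shorter string.
--     if n < 2 or n > len(s):
--         return ''
--     for i in range(len(s)):
--         if s[i:i+n] == s[i] * n:
--             return s[i]
--     return ''
-- ===== Notes on version B (the rewrite author's own statement) =====
-- stated objective: simpler
-- what changed: Replaces A's streaming run-counter loop with a brute-force sliding-window test that returns the first position whose length-n window is a constant string (s[i:i+n] == s[i]*n), plus an early '' for n < 2 where A's count==n check can never fire.
import Mathlib
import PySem

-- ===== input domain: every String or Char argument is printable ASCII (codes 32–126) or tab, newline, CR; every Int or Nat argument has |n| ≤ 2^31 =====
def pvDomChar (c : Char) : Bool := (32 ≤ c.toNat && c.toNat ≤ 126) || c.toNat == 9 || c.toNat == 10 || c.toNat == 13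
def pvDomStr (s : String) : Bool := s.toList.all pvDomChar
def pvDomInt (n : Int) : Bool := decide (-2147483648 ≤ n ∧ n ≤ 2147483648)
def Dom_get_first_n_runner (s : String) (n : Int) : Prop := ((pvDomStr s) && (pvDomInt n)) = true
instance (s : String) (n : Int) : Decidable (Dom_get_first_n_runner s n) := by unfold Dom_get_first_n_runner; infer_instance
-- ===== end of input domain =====

-- B replaces A's streaming run-counter loop with a brute-force sliding-window
-- test (is s[i:i+n] a constant string?); same answers, different algorithm.

-- ===== PORT A =====
-- A's for-loop with state (cur_char, count); cur_char starts as the empty string.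
def pvA_loop : List Char → String → Int → Int → String
  | [], _, _, _ => ""
  | c :: rest, cur_char, count, n =>
    if String.singleton c = cur_char then
      if count + 1 = n then String.singleton c
      else pvA_loop rest cur_char (count + 1) n
    else pvA_loop rest (String.singleton c) 1 n

def get_first_n_runner (s : String) (n : Int) : String :=
  pvA_loop s.toList "" 0 n

-- ===== PORT B =====
-- Source B's for-loop over i in range(len(s)): recursion over the suffixes of s;
-- s[i:i+n] is the length-m take of the suffix, s[i]*n is List.replicate m s[i].
def pvB_find (m : Nat) : List Char → String
  | [] => ""
  | c :: rest =>
    if (c :: rest).take m = List.replicate m c then String.singleton c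
    else pvB_find m rest

def get_first_n_runner_alt (s : String) (n : Int) : String :=
  if n < 2 ∨ n > (s.toList.length : Int) then "" else pvB_find n.toNat s.toList

-- ===== PRECONDITION & SPEC =====
def Spec_get_first_n_runner (s : String) (n : Int) (out : String) : Prop := out = get_first_n_runner_alt s n
instance (s : String) (n : Int) (out : String) : Decidable (Spec_get_first_n_runner s n out) := by unfold Spec_get_first_n_runner; infer_instance

-- ===== CLAIM (what is proved, stated in full; the proofs are below) =====
def Claim_equal_get_first_n_runner : Prop := ∀ (s : String) (n : Int), Dom_get_first_n_runner s n → Spec_get_first_n_runner s n (get_first_n_runner s n)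

-- ===== LEMMAS AND PROOFS =====

theorem pv_singleton_ne_empty (c : Char) : String.singleton c ≠ "" := by
  simp [String.singleton]

theorem pv_singleton_inj {c c0 : Char} : String.singleton c = String.singleton c0 ↔ c = c0 := by
  simp [String.singleton]

-- For n ≤ 1, A never fires its return: once inside a run count ≥ 1, so count+1 ≥ 2 > n.
theorem pvA_low (n : Int) (hn : n ≤ 1) :
    ∀ (l : List Char) (c0 : Char) (count : Int), 1 ≤ count →
      pvA_loop l (String.singleton c0) count n = "" := by
  intro l
  induction l with
  | nil => intro c0 count _; simp [pvA_loop]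
  | cons c rest ih =>
    intro c0 count hc
    by_cases h : String.singleton c = String.singleton c0
    · have hne : ¬ (count + 1 = n) := by omega
      simp only [pvA_loop, if_pos h, if_neg hne]
      exact ih c0 (count + 1) (by omega)
    · simp only [pvA_loop, if_neg h]
      exact ih c 1 (le_refl 1)

theorem pvA_low_start (n : Int) (hn : n ≤ 1) (l : List Char) :
    pvA_loop l "" 0 n = "" := by
  cases l with
  | nil => simp [pvA_loop]
  | cons c rest =>
    simp only [pvA_loop, if_neg (pv_singleton_ne_empty c)]
    exact pvA_low n hn rest c 1 (le_refl 1)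

-- a shorter constant-prefix condition is implied by a longer one
theorem pv_take_mono {a b : Nat} (hab : a ≤ b) {l : List Char} {c : Char}
    (h : l.take b = List.replicate b c) : l.take a = List.replicate a c := by
  have : l.take a = (l.take b).take a := by
    rw [List.take_take]; congr 1; omega
  rw [this, h, List.take_replicate]; congr 1; omega

-- A mid-run with state (c0, count): it returns c0 iff the next n-count chars are
-- all c0; otherwise it behaves like B's window scan on the rest of the string.
theorem pv_inv (n : Int) (hn : 2 ≤ n) :
    ∀ (l : List Char) (c0 : Char) (count : Int), 1 ≤ count → count < n →
      pvA_loop l (String.singleton c0) count n =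
        if l.take (n - count).toNat = List.replicate (n - count).toNat c0
        then String.singleton c0 else pvB_find n.toNat l := by
  intro l
  induction l with
  | nil =>
    intro c0 count h1 h2
    have hno : ¬ (([] : List Char).take (n - count).toNat
        = List.replicate (n - count).toNat c0) := by
      simp only [List.take_nil]
      intro hh
      have := congrArg List.length hh
      simp at this
      omega
    rw [if_neg hno]
    simp [pvA_loop, pvB_find]
  | cons c rest ih =>
    intro c0 count h1 h2
    have hkpos : (n - count).toNat = (n - count - 1).toNat + 1 := by omega
    by_cases h : c = c0
    · subst h
      have hcond : ((c :: rest).take (n - count).toNat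
          = List.replicate (n - count).toNat c)
          ↔ (rest.take (n - count - 1).toNat
          = List.replicate (n - count - 1).toNat c) := by
        rw [hkpos, List.take_succ_cons, List.replicate_succ]
        simp
      by_cases hret : count + 1 = n
      · have hc1 : (c :: rest).take (n - count).toNat
            = List.replicate (n - count).toNat c := by
          rw [show (n - count).toNat = 1 by omega]
          simp
        rw [if_pos hc1]
        simp [pvA_loop, hret]
      · simp only [pvA_loop, if_neg hret]
        rw [ih c (count + 1) (by omega) (by omega)]
        have harg : n - (count + 1) = n - count - 1 := by ring
        rw [harg]
        by_cases hc2 : rest.take (n - count - 1).toNat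
            = List.replicate (n - count - 1).toNat c
        · rw [if_pos hc2, if_pos (hcond.mpr hc2)]
          simp
        · rw [if_neg hc2, if_neg (fun hh => hc2 (hcond.mp hh))]
          -- when the run dies short, the window at this position fails too
          have hwin : ¬ ((c :: rest).take n.toNat = List.replicate n.toNat c) := by
            intro hh
            exact hc2 (hcond.mp (pv_take_mono (a := (n - count).toNat)
              (b := n.toNat) (by omega) hh))
          rw [pvB_find, if_neg hwin]
          simp
    · have hne : ¬ (String.singleton c = String.singleton c0) := by
        rw [pv_singleton_inj]; exact h
      simp only [pvA_loop, if_neg hne]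
      rw [ih c 1 (le_refl 1) (by omega)]
      have hcond0 : ¬ ((c :: rest).take (n - count).toNat
          = List.replicate (n - count).toNat c0) := by
        rw [hkpos, List.take_succ_cons, List.replicate_succ]
        simp [h]
      rw [if_neg hcond0]
      have hm : n.toNat = (n - 1).toNat + 1 := by omega
      have hwiniff : ((c :: rest).take n.toNat = List.replicate n.toNat c)
          ↔ (rest.take (n - 1).toNat = List.replicate (n - 1).toNat c) := by
        rw [hm, List.take_succ_cons, List.replicate_succ]
        simp
      by_cases hw : rest.take (n - 1).toNat = List.replicate (n - 1).toNat c
      · rw [if_pos hw]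
        conv_rhs => rw [pvB_find]
        rw [if_pos (hwiniff.mpr hw)]
      · rw [if_neg hw]
        conv_rhs => rw [pvB_find]
        rw [if_neg (fun hh => hw (hwiniff.mp hh))]

-- a run of m equal characters cannot fit in a shorter list
theorem pvB_find_long (m : Nat) : ∀ l : List Char, l.length < m → pvB_find m l = "" := by
  intro l
  induction l with
  | nil => intro _; rfl
  | cons c rest ih =>
    intro hlen
    have hno : ¬ ((c :: rest).take m = List.replicate m c) := by
      intro hh
      have h2 := congrArg List.length hh
      simp [List.length_take, List.length_cons] at h2 hlen
      omega
    rw [pvB_find, if_neg hno]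
    exact ih (by simp only [List.length_cons] at hlen; omega)

-- for n ≥ 2, A's counter loop equals B's window scan
theorem pv_AB (n : Int) (hn : 2 ≤ n) (l : List Char) :
    pvA_loop l "" 0 n = pvB_find n.toNat l := by
  cases l with
  | nil => simp [pvA_loop, pvB_find]
  | cons c rest =>
    simp only [pvA_loop, if_neg (pv_singleton_ne_empty c)]
    rw [pv_inv n (by omega) rest c 1 (le_refl 1) (by omega)]
    have hm : n.toNat = (n - 1).toNat + 1 := by omega
    have hwiniff : ((c :: rest).take n.toNat = List.replicate n.toNat c)
        ↔ (rest.take (n - 1).toNat = List.replicate (n - 1).toNat c) := by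
      rw [hm, List.take_succ_cons, List.replicate_succ]
      simp
    by_cases hw : rest.take (n - 1).toNat = List.replicate (n - 1).toNat c
    · rw [if_pos hw]
      conv_rhs => rw [pvB_find]
      rw [if_pos (hwiniff.mpr hw)]
    · rw [if_neg hw]
      conv_rhs => rw [pvB_find]
      rw [if_neg (fun hh => hw (hwiniff.mp hh))]

-- ===== VERDICT (by name: the statement is the Claim_ definition above) =====
theorem get_first_n_runner_spec : Claim_equal_get_first_n_runner := by
  intro s n _
  unfold Spec_get_first_n_runner get_first_n_runner get_first_n_runner_alt
  by_cases h2 : n < 2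
  · rw [if_pos (Or.inl h2)]
    exact pvA_low_start n (by omega) s.toList
  · have hAB := pv_AB n (by omega) s.toList
    by_cases h3 : n > (s.toList.length : Int)
    · rw [if_pos (Or.inr h3)]
      rw [hAB]
      exact pvB_find_long n.toNat s.toList (by omega)
    · rw [if_neg (by omega)]
      exact hAB
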